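-- pv_equiv track=rewrite | github.com/vuhoangminh/vqa_idrid | datasets/utils/tools_qa_utils.py | get_tool_position
-- ===== SOURCE A (Python) =====
-- from operator import itemgetter
--
-- def get_tool_position(boxes):
--     keys = ["left", "right", "top", "bottom"]
--     values = list()
--
--     tools = list()
--     xmid = list()
--     ymid = list()
--     for i in range(len(boxes)):
--         tools.append(boxes[i][0])
--         xmid.append(boxes[i][2]-boxes[i][1])
--         ymid.append(boxes[i][4]-boxes[i][3])
--
--     min_xmid_idx = min(enumerate(xmid), key=itemgetter(1))[0]
--     max_xmid_idx = max(enumerate(xmid), key=itemgetter(1))[0]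
--     min_ymid_idx = min(enumerate(ymid), key=itemgetter(1))[0]
--     max_ymid_idx = max(enumerate(ymid), key=itemgetter(1))[0]
--
--     values.extend([tools[min_xmid_idx], tools[max_xmid_idx], tools[min_ymid_idx], tools[max_ymid_idx]])
--
--     return dict(zip(keys, values))
-- ===== SOURCE B (Python) =====
-- def get_tool_position(boxes):
--     b = boxes[0]
--     left = right = (b[0], b[2] - b[1])
--     top = bottom = (b[0], b[4] - b[3])
--     for b in boxes[1:]:
--         t, x, y = b[0], b[2] - b[1], b[4] - b[3]
--         if x < left[1]:
--             left = (t, x)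
--         if x > right[1]:
--             right = (t, x)
--         if y < top[1]:
--             top = (t, y)
--         if y > bottom[1]:
--             bottom = (t, y)
--     return {"left": left[0], "right": right[0], "top": top[0], "bottom": bottom[0]}
-- ===== Notes on version B (the rewrite author's own statement) =====
-- stated objective: simpler
-- what changed: Replaces A's three intermediate lists plus four enumerate-min/max scans and index lookups with one pass over the boxes that maintains four (tool, value) candidates, updating min on strict < and max on strict > so the first extremal box wins exactly as Python's min/max do.
import Mathlib
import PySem

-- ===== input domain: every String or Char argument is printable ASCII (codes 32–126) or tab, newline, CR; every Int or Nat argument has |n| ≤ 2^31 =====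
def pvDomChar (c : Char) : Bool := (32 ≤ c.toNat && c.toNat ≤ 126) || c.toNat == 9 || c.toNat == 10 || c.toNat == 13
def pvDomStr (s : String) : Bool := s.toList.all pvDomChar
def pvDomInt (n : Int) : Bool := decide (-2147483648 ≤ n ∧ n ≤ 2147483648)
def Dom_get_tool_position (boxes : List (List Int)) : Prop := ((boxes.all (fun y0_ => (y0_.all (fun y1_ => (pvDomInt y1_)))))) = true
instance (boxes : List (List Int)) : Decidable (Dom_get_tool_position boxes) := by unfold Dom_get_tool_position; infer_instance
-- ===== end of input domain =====

-- B replaces A's three intermediate lists and four enumerate-min/max scans by one pass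
-- maintaining four (tool, value) candidates; objective: simpler (same asymptotic cost).

-- ===== PORT A =====
def get_tool_position (boxes : List (List Int)) : List (String × Int) :=
  let keys : List String := ["left", "right", "top", "bottom"]
  let st := (PySem.List.pyRange 0 boxes.length 1).foldl
    (fun (acc : List Int × List Int × List Int) i =>
      let b := PySem.List.pyGetD boxes i []
      (acc.1 ++ [PySem.List.pyGetD b 0 0],
       acc.2.1 ++ [PySem.List.pyGetD b 2 0 - PySem.List.pyGetD b 1 0],
       acc.2.2 ++ [PySem.List.pyGetD b 4 0 - PySem.List.pyGetD b 3 0]))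
    ([], [], [])
  let tools := st.1
  let xmid := st.2.1
  let ymid := st.2.2
  let min_xmid_idx := ((PySem.List.min? (PySem.List.enumerate xmid 0) (·.2)).getD (0, 0)).1
  let max_xmid_idx := ((PySem.List.max? (PySem.List.enumerate xmid 0) (·.2)).getD (0, 0)).1
  let min_ymid_idx := ((PySem.List.min? (PySem.List.enumerate ymid 0) (·.2)).getD (0, 0)).1
  let max_ymid_idx := ((PySem.List.max? (PySem.List.enumerate ymid 0) (·.2)).getD (0, 0)).1
  let values : List Int :=
    [PySem.List.pyGetD tools min_xmid_idx 0, PySem.List.pyGetD tools max_xmid_idx 0,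
     PySem.List.pyGetD tools min_ymid_idx 0, PySem.List.pyGetD tools max_ymid_idx 0]
  keys.zip values

-- ===== PORT B =====
def altLoop (left right top bottom : Int × Int) :
    List (List Int) → (Int × Int) × (Int × Int) × (Int × Int) × (Int × Int)
  | [] => (left, right, top, bottom)
  | b :: rest =>
    let t := b.getD 0 0
    let x := b.getD 2 0 - b.getD 1 0
    let y := b.getD 4 0 - b.getD 3 0
    altLoop (if x < left.2 then (t, x) else left)
            (if right.2 < x then (t, x) else right)
            (if y < top.2 then (t, y) else top)
            (if bottom.2 < y then (t, y) else bottom) rest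

def get_tool_position_alt (boxes : List (List Int)) : List (String × Int) :=
  match boxes with
  | [] => []
  | b :: rest =>
    let t := b.getD 0 0
    let x := b.getD 2 0 - b.getD 1 0
    let y := b.getD 4 0 - b.getD 3 0
    let r := altLoop (t, x) (t, x) (t, y) (t, y) rest
    [("left", r.1.1), ("right", r.2.1.1), ("top", r.2.2.1.1), ("bottom", r.2.2.2.1)]

-- ===== PRECONDITION & SPEC =====
-- Pre_: exactly where Python A returns: nonempty (min() raises ValueError on an empty
-- sequence) and every box has at least 5 entries (indices 0..4 are read).
def Pre_get_tool_position (boxes : List (List Int)) : Prop :=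
  boxes ≠ [] ∧ ∀ b ∈ boxes, 5 ≤ b.length
instance (boxes : List (List Int)) : Decidable (Pre_get_tool_position boxes) := by
  unfold Pre_get_tool_position; infer_instance

def pvWitness_get_tool_position : List (List Int) := [[7, 1, 4, 2, 9], [3, 0, 10, 5, 6]]

def Spec_get_tool_position (boxes : List (List Int)) (out : List (String × Int)) : Prop := out = get_tool_position_alt boxes
instance (boxes : List (List Int)) (out : List (String × Int)) : Decidable (Spec_get_tool_position boxes out) := by unfold Spec_get_tool_position; infer_instance

-- ===== CLAIM (what is proved, stated in full; the proofs are below) =====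
def Claim_equal_get_tool_position : Prop := ∀ (boxes : List (List Int)), Dom_get_tool_position boxes → Pre_get_tool_position boxes → Spec_get_tool_position boxes (get_tool_position boxes)

-- ===== LEMMAS AND PROOFS =====

-- candidate update, parameterised by the strict comparison (min: · < ·, max: flipped)
def sel (C : Int → Int → Prop) [DecidableRel C] (c p : Int × Int) : Int × Int :=
  if C p.2 c.2 then p else c

def run (C : Int → Int → Prop) [DecidableRel C] (c : Int × Int) (ps : List (Int × Int)) :
    Int × Int :=
  ps.foldl (sel C) c

def tOf (b : List Int) : Int := b.getD 0 0
def xOf (b : List Int) : Int := b.getD 2 0 - b.getD 1 0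
def yOf (b : List Int) : Int := b.getD 4 0 - b.getD 3 0
def px (b : List Int) : Int × Int := (tOf b, xOf b)
def py (b : List Int) : Int × Int := (tOf b, yOf b)

lemma pg0 (b : List Int) : PySem.List.pyGetD b 0 0 = tOf b := by simp [pysem, tOf]
lemma pgx (b : List Int) :
    PySem.List.pyGetD b 2 0 - PySem.List.pyGetD b 1 0 = xOf b := by simp [pysem, xOf]
lemma pgy (b : List Int) :
    PySem.List.pyGetD b 4 0 - PySem.List.pyGetD b 3 0 = yOf b := by simp [pysem, yOf]

lemma altLoop_eq (bs : List (List Int)) : ∀ l r t b,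
    altLoop l r t b bs =
      (run (· < ·) l (bs.map px), run (fun a c => c < a) r (bs.map px),
       run (· < ·) t (bs.map py), run (fun a c => c < a) b (bs.map py)) := by
  induction bs with
  | nil => intro l r t b; simp [altLoop, run]
  | cons hd tl ih =>
    intro l r t b
    simp only [altLoop, List.map_cons, run, List.foldl_cons]
    rw [ih]
    simp [run, sel, px, py, tOf, xOf, yOf]

-- A's loop builds the three lists tools/xmid/ymid as maps over the boxes
lemma loopA_eq (bs : List (List Int)) : ∀ (t0 x0 y0 : List Int),
    bs.foldl
      (fun (acc : List Int × List Int × List Int) b =>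
        (acc.1 ++ [PySem.List.pyGetD b 0 0],
         acc.2.1 ++ [PySem.List.pyGetD b 2 0 - PySem.List.pyGetD b 1 0],
         acc.2.2 ++ [PySem.List.pyGetD b 4 0 - PySem.List.pyGetD b 3 0]))
      (t0, x0, y0)
    = (t0 ++ bs.map tOf, x0 ++ bs.map xOf, y0 ++ bs.map yOf) := by
  induction bs with
  | nil => intro t0 x0 y0; simp
  | cons hd tl ih =>
    intro t0 x0 y0
    simp only [List.foldl_cons, List.map_cons]
    rw [ih]
    simp [pg0, pgx, pgy]

-- CORE: A's index-tracking fold, read back through the tools list, is B's candidate fold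
lemma core (C : Int → Int → Prop) [DecidableRel C] :
    ∀ (ps : List (Int × Int)) (T : List Int) (s i : Int) (c : Int × Int),
      PySem.List.pyGetD T i 0 = c.1 →
      (∀ (k : Nat) (hk : k < ps.length), PySem.List.pyGetD T (s + k) 0 = (ps[k]'hk).1) →
      (PySem.List.pyGetD T
          (((PySem.List.enumerate (ps.map (·.2)) s).foldl
            (fun (m : Int × Int) q => if C q.2 m.2 then q else m) (i, c.2)).1) 0,
        ((PySem.List.enumerate (ps.map (·.2)) s).foldl
            (fun (m : Int × Int) q => if C q.2 m.2 then q else m) (i, c.2)).2)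
      = run C c ps := by
  intro ps
  induction ps with
  | nil => intro T s i c h1 _; simp [run, h1]
  | cons hd tl ih =>
    intro T s i c h1 h2
    simp only [List.map_cons, PySem.List.enumerate_cons, List.foldl_cons, run, List.foldl_cons]
    have h0 : PySem.List.pyGetD T s 0 = hd.1 := by
      have := h2 0 (by simp)
      simpa using this
    have h2' : ∀ (k : Nat) (hk : k < tl.length), PySem.List.pyGetD T (s + 1 + (k : Int)) 0 = (tl[k]'hk).1 := by
      intro k hk
      have := h2 (k + 1) (by simpa using hk)
      have hcast : s + ((k + 1 : Nat) : Int) = s + 1 + (k : Int) := by push_cast; ring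
      rw [hcast] at this
      simpa using this
    by_cases hc : C hd.2 c.2
    · simpa [hc, sel] using ih T (s + 1) s (sel C c hd) (by simp [sel, hc, h0]) h2'
    · simpa [hc, sel] using ih T (s + 1) i (sel C c hd) (by simp [sel, hc, h1]) h2'

-- min/max over the enumerated list, peeled to a plain fold on pairs
lemma min?_cons_key2 (p : Int × Int) (l : List (Int × Int)) :
    PySem.List.min? (p :: l) (·.2) =
      some (l.foldl (fun m q => if q.2 < m.2 then q else m) p) := by
  induction l generalizing p with
  | nil => rfl
  | cons q l ih =>
    by_cases hc : q.2 < p.2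
    · have h := ih q
      simp only [PySem.List.min?, List.foldl_cons] at h ⊢
      simpa [hc] using h
    · have h := ih p
      simp only [PySem.List.min?, List.foldl_cons] at h ⊢
      simpa [hc] using h

lemma max?_cons_key2 (p : Int × Int) (l : List (Int × Int)) :
    PySem.List.max? (p :: l) (·.2) =
      some (l.foldl (fun m q => if m.2 < q.2 then q else m) p) := by
  induction l generalizing p with
  | nil => rfl
  | cons q l ih =>
    by_cases hc : p.2 < q.2
    · have h := ih q
      simp only [PySem.List.max?, List.foldl_cons] at h ⊢
      simpa [hc] using h
    · have h := ih p
      simp only [PySem.List.max?, List.foldl_cons] at h ⊢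
      simpa [hc] using h

lemma map_snd_px (rest : List (List Int)) :
    (rest.map px).map (fun p => p.2) = rest.map xOf := by
  simp [List.map_map, px]

lemma map_snd_py (rest : List (List Int)) :
    (rest.map py).map (fun p => p.2) = rest.map yOf := by
  simp [List.map_map, py]

lemma main_cons (b : List Int) (rest : List (List Int)) :
    get_tool_position (b :: rest) = get_tool_position_alt (b :: rest) := by
  -- alignment hypotheses for `core` over the tools list
  have hT : PySem.List.pyGetD ((b :: rest).map tOf) 0 0 = tOf b := by
    simp [pysem]
  have halign : ∀ (k : Nat) (hk : k < rest.length),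
      PySem.List.pyGetD ((b :: rest).map tOf) (1 + (k : Int)) 0 = tOf (rest[k]'hk) := by
    intro k hk
    have hc : (1 : Int) + (k : Int) = ((k + 1 : Nat) : Int) := by push_cast; ring
    rw [hc, PySem.List.pyGetD_natCast]
    simp [List.getD_eq_getElem?_getD, hk]
  have halign_x : ∀ (k : Nat) (hk : k < (rest.map px).length),
      PySem.List.pyGetD ((b :: rest).map tOf) (1 + (k : Int)) 0 = ((rest.map px)[k]'hk).1 := by
    intro k hk
    have hk' : k < rest.length := by simpa using hk
    simpa [px] using halign k hk'
  have halign_y : ∀ (k : Nat) (hk : k < (rest.map py).length),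
      PySem.List.pyGetD ((b :: rest).map tOf) (1 + (k : Int)) 0 = ((rest.map py)[k]'hk).1 := by
    intro k hk
    have hk' : k < rest.length := by simpa using hk
    simpa [py] using halign k hk'
  have hminx := core (· < ·) (rest.map px) ((b :: rest).map tOf) 1 0 (px b) hT halign_x
  have hmaxx := core (fun a c => c < a) (rest.map px) ((b :: rest).map tOf) 1 0 (px b) hT halign_x
  have hminy := core (· < ·) (rest.map py) ((b :: rest).map tOf) 1 0 (py b) hT halign_y
  have hmaxy := core (fun a c => c < a) (rest.map py) ((b :: rest).map tOf) 1 0 (py b) hT halign_y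
  rw [map_snd_px] at hminx hmaxx
  rw [map_snd_py] at hminy hmaxy
  simp only [List.map_cons, px, py] at hminx hmaxx hminy hmaxy
  have e1 := congrArg Prod.fst hminx
  have e2 := congrArg Prod.fst hmaxx
  have e3 := congrArg Prod.fst hminy
  have e4 := congrArg Prod.fst hmaxy
  simp only at e1 e2 e3 e4
  -- unfold both ports
  rw [get_tool_position, get_tool_position_alt]
  rw [PySem.List.foldl_pyRange_zero_pyGetD' (b :: rest) []
      (fun (acc : List Int × List Int × List Int) bb =>
        (acc.1 ++ [PySem.List.pyGetD bb 0 0],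
         acc.2.1 ++ [PySem.List.pyGetD bb 2 0 - PySem.List.pyGetD bb 1 0],
         acc.2.2 ++ [PySem.List.pyGetD bb 4 0 - PySem.List.pyGetD bb 3 0]))
      ([], [], [])]
  rw [loopA_eq]
  rw [altLoop_eq]
  simp only [List.nil_append, List.map_cons, PySem.List.enumerate_cons, zero_add,
    min?_cons_key2, max?_cons_key2, Option.getD_some]
  rw [e1, e2, e3, e4]
  simp [tOf, xOf, yOf]

-- ===== VERDICT (by name: the statement is the Claim_ definition above) =====
theorem get_tool_position_spec : Claim_equal_get_tool_position := by
  intro boxes _ hpre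
  unfold Spec_get_tool_position
  match boxes, hpre with
  | [], h => exact absurd rfl h.1
  | b :: rest, _ => exact main_cons b rest
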